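-- pv_equiv track=rewrite | github.com/bagakit/bagakit | skills/harness/bagakit-brainstorm/scripts/bagakit-brainstorm.py | question_card_header
-- ===== SOURCE A (Python) =====
-- def question_card_header(card_block: str) -> str:
--     lines = [line.strip() for line in card_block.splitlines()]
--     if not lines:
--         return ""
--     header_lines: list[str] = []
--     for line in lines:
--         if not line:
--             continue
--         if line.startswith(">"):
--             break
--         if line == "---":
--             continue
--         header_lines.append(line)
--     return " ".join(header_lines).strip()
-- ===== SOURCE B (Python) =====
-- def question_card_header(card_block: str) -> str:
--     def rec(lines: list[str]) -> list[str]: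
--         if not lines:
--             return []
--         head = lines[0].strip()
--         if head.startswith(">"):
--             return []
--         rest = rec(lines[1:])
--         return rest if (not head or head == "---") else [head] + rest
--     return " ".join(rec(card_block.splitlines())).strip()
-- ===== Notes on version B (the rewrite author's own statement) =====
-- stated objective: alternative
-- what changed: Replaces A's iterative loop with break/continue over a pre-stripped line list by structural recursion on the raw line list that strips each head on the fly and builds the header list back out of the recursion.
import Mathlib
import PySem

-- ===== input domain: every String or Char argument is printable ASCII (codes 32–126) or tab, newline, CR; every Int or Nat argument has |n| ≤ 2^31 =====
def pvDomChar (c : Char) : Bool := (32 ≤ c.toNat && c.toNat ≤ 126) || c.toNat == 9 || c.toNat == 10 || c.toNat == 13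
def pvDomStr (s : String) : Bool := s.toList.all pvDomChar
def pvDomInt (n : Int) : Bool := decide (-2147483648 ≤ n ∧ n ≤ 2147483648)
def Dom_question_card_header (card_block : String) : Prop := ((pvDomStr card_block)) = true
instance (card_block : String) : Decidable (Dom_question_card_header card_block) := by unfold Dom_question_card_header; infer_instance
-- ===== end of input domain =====

-- B replaces A's iterative loop with break/continue over a pre-stripped line list by
-- structural recursion on the raw lines, stripping each head on the fly (alternative decomposition).
-- ===== PORT A =====
-- one interleaved loop with continue/break: acc is header_lines so far
def qchLoopA : List String → List String → List String
  | [], acc => acc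
  | l :: rest, acc =>
    if l = "" then qchLoopA rest acc
    else if PySem.Str.startswith l ">" then acc
    else if l = "---" then qchLoopA rest acc
    else qchLoopA rest (acc ++ [l])

def question_card_header (card_block : String) : String :=
  let lines := (PySem.Str.splitlines card_block).map PySem.Str.strip
  if lines = [] then ""
  else PySem.Str.strip (PySem.Str.join " " (qchLoopA lines []))

-- ===== PORT B =====
-- rec: strips the head line, stops at a blockquote, recurses on the tail
def qchRecB : List String → List String
  | [] => []
  | l :: rest =>
    let head := PySem.Str.strip l
    if PySem.Str.startswith head ">" then []
    else
      let restv := qchRecB rest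
      if head = "" ∨ head = "---" then restv else head :: restv

def question_card_header_alt (card_block : String) : String :=
  PySem.Str.strip (PySem.Str.join " " (qchRecB (PySem.Str.splitlines card_block)))

-- ===== PRECONDITION & SPEC =====
def Spec_question_card_header (card_block : String) (out : String) : Prop := out = question_card_header_alt card_block
instance (card_block : String) (out : String) : Decidable (Spec_question_card_header card_block out) := by unfold Spec_question_card_header; infer_instance

-- ===== CLAIM =====
def Claim_equal_question_card_header : Prop := ∀ (card_block : String), Dom_question_card_header card_block → Spec_question_card_header card_block (question_card_header card_block)

-- ===== LEMMAS AND PROOFS =====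
lemma qchLoopA_eq (ls : List String) (acc : List String) :
    qchLoopA (ls.map PySem.Str.strip) acc = acc ++ qchRecB ls := by
  induction ls generalizing acc with
  | nil => simp [qchLoopA, qchRecB]
  | cons l rest ih =>
    simp only [List.map_cons, qchLoopA, qchRecB]
    split_ifs <;> simp_all [ih, PySem.Chars.startswith]

-- ===== VERDICT =====
theorem question_card_header_spec : Claim_equal_question_card_header := by
  intro card_block _
  unfold Spec_question_card_header question_card_header question_card_header_alt
  rcases h : PySem.Str.splitlines card_block with _ | ⟨l, ls⟩
  · decide
  · rw [if_neg (by simp), qchLoopA_eq, List.nil_append]
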